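-- pv_equiv track=rewrite | github.com/VJagiasi/csc-codey-quest-for-bugs | quest-for-bugs.py | decrypt_sequence
-- ===== SOURCE A (Python) =====
-- from typing import List
--
-- def decrypt_sequence(sequence: List[int]) -> int:
--     def helper(seq, acc=1):
--         if len(seq) < 2:
--             if acc % 3 == 0:
--                 return acc * 7
--             return acc * 42
--
--         total = 0
--         for i in range(len(seq)):
--             if i % 2 == 0:
--                 total += seq[i] * (seq[-1] + 1)
--             else:
--                 total -= seq[i] * (seq[0] - 2)
--
--         def nested_helper(n):
--             return (n ** 2 + n) // 5 if n % 3 != 0 else n + 5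
--         for x in seq:
--             total += nested_helper(x)
--
--         if len(seq) > 3:
--             total *= len(seq) // 2
--
--         return helper(seq[1:], total)
--
--     return (helper(sequence) * 13 + 9) // (len(sequence) if len(sequence) else 1)
-- ===== SOURCE B (Python) =====
-- from typing import List
--
-- def decrypt_sequence(sequence: List[int]) -> int:
--     # Closed form: A's recursion never reads its accumulator until the suffix
--     # of length 2, so the result depends only on the last two elements and len.
--     n = len(sequence)
--     if n < 2:
--         return 555
--     a, b = sequence[-2], sequence[-1]
--
--     def nested_helper(m):
--         return (m ** 2 + m) // 5 if m % 3 != 0 else m + 5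
--
--     total = a * (b + 1) - b * (a - 2) + nested_helper(a) + nested_helper(b)
--     acc = total * 7 if total % 3 == 0 else total * 42
--     return (acc * 13 + 9) // n
-- ===== Notes on version B (the rewrite author's own statement) =====
-- stated objective: simpler
-- what changed: A recursively re-scans every suffix but never reads the accumulator until the length-2 suffix; B replaces the whole recursion and loops with an O(1) closed form on the last two elements and the length (returning the constant 555 when len < 2).
import Mathlib
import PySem

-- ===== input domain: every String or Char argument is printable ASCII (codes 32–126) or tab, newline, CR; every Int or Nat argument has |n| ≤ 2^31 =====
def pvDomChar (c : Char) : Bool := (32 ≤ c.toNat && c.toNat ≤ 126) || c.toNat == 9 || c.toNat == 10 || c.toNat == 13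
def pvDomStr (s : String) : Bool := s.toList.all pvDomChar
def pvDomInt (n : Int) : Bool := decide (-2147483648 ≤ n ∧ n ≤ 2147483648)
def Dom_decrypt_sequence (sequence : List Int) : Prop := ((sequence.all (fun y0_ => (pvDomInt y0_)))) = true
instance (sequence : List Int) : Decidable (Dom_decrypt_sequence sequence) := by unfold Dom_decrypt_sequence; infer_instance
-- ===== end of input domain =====

-- B is a closed form: A's recursion never reads its accumulator until the length-2
-- suffix, so the result depends only on the last two elements and the length (simpler).

-- ===== PORT A =====
-- nested_helper of A
def pvNestedA (n : Int) : Int :=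
  if PySem.Int.mod n 3 ≠ 0 then PySem.Int.floordiv (n ^ 2 + n) 5 else n + 5

-- helper of A (recursion on seq[1:]; seq.length decreases)
def pvHelperA (seq : List Int) (acc : Int) : Int :=
  if seq.length < 2 then
    if PySem.Int.mod acc 3 = 0 then acc * 7 else acc * 42
  else
    let t1 : Int := (PySem.List.pyRange 0 seq.length 1).foldl (fun total i =>
      if PySem.Int.mod i 2 = 0 then
        total + ((PySem.List.pyGet? seq i).getD 0) * (((PySem.List.pyGet? seq (-1)).getD 0) + 1)
      else
        total - ((PySem.List.pyGet? seq i).getD 0) * (((PySem.List.pyGet? seq 0).getD 0) - 2)) 0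
    let t2 : Int := seq.foldl (fun total x => total + pvNestedA x) t1
    let t3 : Int := if seq.length > 3 then t2 * PySem.Int.floordiv (seq.length : Int) 2 else t2
    pvHelperA (PySem.List.slice seq (some 1) none) t3
termination_by seq.length
decreasing_by
  simp only [PySem.List.slice_from_one, List.length_tail]
  omega

def decrypt_sequence (sequence : List Int) : Int :=
  PySem.Int.floordiv (pvHelperA sequence 1 * 13 + 9)
    (if sequence.length ≠ 0 then (sequence.length : Int) else 1)

-- ===== PORT B =====
def pvNestedB (m : Int) : Int :=
  if PySem.Int.mod m 3 ≠ 0 then PySem.Int.floordiv (m ^ 2 + m) 5 else m + 5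

def decrypt_sequence_alt (sequence : List Int) : Int :=
  let n : Int := sequence.length
  if n < 2 then 555
  else
    let a : Int := (PySem.List.pyGet? sequence (-2)).getD 0
    let b : Int := (PySem.List.pyGet? sequence (-1)).getD 0
    let total : Int := a * (b + 1) - b * (a - 2) + pvNestedB a + pvNestedB b
    let acc : Int := if PySem.Int.mod total 3 = 0 then total * 7 else total * 42
    PySem.Int.floordiv (acc * 13 + 9) n

-- ===== PRECONDITION & SPEC =====
def Spec_decrypt_sequence (sequence : List Int) (out : Int) : Prop := out = decrypt_sequence_alt sequence
instance (sequence : List Int) (out : Int) : Decidable (Spec_decrypt_sequence sequence out) := by unfold Spec_decrypt_sequence; infer_instance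

-- ===== CLAIM (what is proved, stated in full; the proofs are below) =====
def Claim_equal_decrypt_sequence : Prop := ∀ (sequence : List Int), Dom_decrypt_sequence sequence → Spec_decrypt_sequence sequence (decrypt_sequence sequence)

-- ===== LEMMAS AND PROOFS =====

-- value of A's helper on any list ending in [a, b], for any accumulator
def pvG (a b : Int) : Int :=
  let total : Int := a * (b + 1) - b * (a - 2) + pvNestedA a + pvNestedA b
  if PySem.Int.mod total 3 = 0 then total * 7 else total * 42

lemma pvHelperA_pair (a b acc : Int) : pvHelperA [a, b] acc = pvG a b := by
  rw [pvHelperA.eq_def]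
  simp [pvHelperA, pvG, PySem.List.pyRange, PySem.List.pyGet?, PySem.List.pyIdx?,
        PySem.List.slice, PySem.List.clampIdx, List.range_succ]

lemma pvHelperA_last_two (pre : List Int) (a b acc : Int) :
    pvHelperA (pre ++ [a, b]) acc = pvG a b := by
  induction pre generalizing acc with
  | nil => exact pvHelperA_pair a b acc
  | cons x xs ih =>
    rw [pvHelperA.eq_def,
        if_neg (show ¬ (x :: xs ++ [a, b]).length < 2 by
          simp only [List.length_cons, List.length_append]; omega)]
    simp only [PySem.List.slice_from_one]
    exact ih _

-- every list of length ≥ 2 splits as pre ++ [a, b]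
lemma split_last_two (l : List Int) (h : 2 ≤ l.length) :
    ∃ pre a b, l = pre ++ [a, b] := by
  induction l with
  | nil => simp at h
  | cons x xs ih =>
    match xs, ih with
    | [], _ => exact absurd h (by simp)
    | [y], _ => exact ⟨[], x, y, rfl⟩
    | y :: z :: zs, ih =>
      obtain ⟨pre, a, b, hpre⟩ := ih (by simp)
      exact ⟨x :: pre, a, b, by simp [hpre]⟩

lemma pyGet_neg_one_last (pre : List Int) (a b : Int) :
    (PySem.List.pyGet? (pre ++ [a, b]) (-1)).getD 0 = b := by
  simp [PySem.List.pyGet?_neg_one, List.getLast?_append]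

lemma pyGet_neg_two_last (pre : List Int) (a b : Int) :
    (PySem.List.pyGet? (pre ++ [a, b]) (-2)).getD 0 = a := by
  have hlen : (pre ++ [a, b]).length = pre.length + 2 := by simp
  rw [PySem.List.pyGet?_neg_ofNat (pre ++ [a, b]) 2 (by omega) (by omega)]
  simp [hlen]

-- ===== VERDICT (by name: the statement is the Claim_ definition above) =====
theorem decrypt_sequence_spec : Claim_equal_decrypt_sequence := by
  intro sequence _
  unfold Spec_decrypt_sequence decrypt_sequence decrypt_sequence_alt
  by_cases h2 : (sequence.length : Int) < 2
  · -- short sequences: A's helper hits the base case with acc = 1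
    rw [pvHelperA]
    have hl : sequence.length < 2 := by exact_mod_cast h2
    simp only [hl, if_pos, h2, if_pos]
    norm_num [PySem.Int.mod]
    interval_cases h : sequence.length <;> simp_all
  · obtain ⟨pre, a, b, rfl⟩ := split_last_two sequence (by omega)
    have hn0 : (pre ++ [a, b]).length ≠ 0 := by simp
    rw [pvHelperA_last_two, if_neg h2]
    simp only [hn0, if_pos, ne_eq, not_false_iff,
      pyGet_neg_one_last, pyGet_neg_two_last]
    rfl
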